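-- pv_equiv track=rewrite | github.com/mr-lobstr/Laboratory-2 | Задание3/prog3.py | num_reverse
-- ===== SOURCE A (Python) =====
-- def num_reverse(num):
--     length = 0
--     num_copy = num
--     digit = 10
--
--     while num_copy:
--         if num_copy % 10 >= digit:
--             return 0
--
--         length += 1
--         digit = num_copy % 10
--         num_copy //= 10
--
--     for i in range(length):
--         num_copy = num_copy * 10 + num % 10
--         num //= 10
--
--     return num_copy if length > 1 else 0
-- ===== SOURCE B (Python) =====
-- def num_reverse(num):
--     # single recursive pass: validate the digit ordering, build the reversal
--     # and count digits together, instead of a validate/count pass followed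
--     # by a second reversal pass.
--     def go(n, prev, rev, count):
--         if n == 0:
--             return rev if count > 1 else 0
--         d = n % 10
--         if d >= prev:
--             return 0
--         return go(n // 10, d, rev * 10 + d, count + 1)
--     return go(num, 10, 0, 0)
-- ===== Notes on version B (the rewrite author's own statement) =====
-- stated objective: simpler
-- what changed: A validates/counts digits in one while loop and then re-scans the number in a second loop to build the reversal; B is a single recursive pass that maintains the previous digit, the reversed value and the digit count together, so the second scan disappears.
import Mathlib
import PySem

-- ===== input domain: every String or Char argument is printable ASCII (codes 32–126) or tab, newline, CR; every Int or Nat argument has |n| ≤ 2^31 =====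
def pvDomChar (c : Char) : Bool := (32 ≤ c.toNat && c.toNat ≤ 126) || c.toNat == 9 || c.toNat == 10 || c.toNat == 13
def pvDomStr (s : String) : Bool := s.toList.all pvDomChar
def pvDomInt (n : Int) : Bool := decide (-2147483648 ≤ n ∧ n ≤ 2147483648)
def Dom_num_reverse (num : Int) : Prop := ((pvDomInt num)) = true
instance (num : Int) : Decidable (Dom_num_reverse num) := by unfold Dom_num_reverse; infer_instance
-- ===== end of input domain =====

-- B fuses A's validate/count pass and reversal pass into one recursive pass (objective: simpler).

-- ===== PORT A =====
-- A's while loop: checks each digit against the previous one ('digit'), counting the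
-- digits; returns none when A's 'return 0' fires, otherwise the final 'length'.
-- Terminates because 'digit' strictly decreases (the continuing branch requires
-- mod num_copy 10 < digit, and the new digit is that nonnegative mod).
def numrevWhile (num_copy digit length : Int) : Option Int :=
  if _h : num_copy ≠ 0 then
    if _h2 : PySem.Int.mod num_copy 10 ≥ digit then none
    else numrevWhile (PySem.Int.floordiv num_copy 10) (PySem.Int.mod num_copy 10) (length + 1)
  else some length
termination_by digit.toNat
decreasing_by
  have h0 : (0:Int) ≤ PySem.Int.mod num_copy 10 := PySem.Int.mod_nonneg _ (by norm_num)
  omega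

-- A's for loop: 'for i in range(length): num_copy = num_copy*10 + num % 10; num //= 10'
def numrevFor : Nat → Int → Int → Int × Int
  | 0, nc, num => (nc, num)
  | k + 1, nc, num => numrevFor k (nc * 10 + PySem.Int.mod num 10) (PySem.Int.floordiv num 10)

def num_reverse (num : Int) : Int :=
  match numrevWhile num 10 0 with
  | none => 0
  | some length =>
      let p := numrevFor length.toNat 0 num
      if length > 1 then p.1 else 0

-- ===== PORT B =====
-- B's recursive helper 'go' (same termination measure: prev strictly decreases).
def numrevGo (n prev rev count : Int) : Int :=
  if _h : n ≠ 0 then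
    if _h2 : PySem.Int.mod n 10 ≥ prev then 0
    else numrevGo (PySem.Int.floordiv n 10) (PySem.Int.mod n 10)
           (rev * 10 + PySem.Int.mod n 10) (count + 1)
  else if count > 1 then rev else 0
termination_by prev.toNat
decreasing_by
  have h0 : (0:Int) ≤ PySem.Int.mod n 10 := PySem.Int.mod_nonneg _ (by norm_num)
  omega

def num_reverse_alt (num : Int) : Int := numrevGo num 10 0 0

-- ===== PRECONDITION & SPEC =====
def Spec_num_reverse (num : Int) (out : Int) : Prop := out = num_reverse_alt num
instance (num : Int) (out : Int) : Decidable (Spec_num_reverse num out) := by unfold Spec_num_reverse; infer_instance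

-- ===== CLAIM (what is proved, stated in full; the proofs are below) =====
def Claim_equal_num_reverse : Prop := ∀ (num : Int), Dom_num_reverse num → Spec_num_reverse num (num_reverse num)

-- ===== LEMMAS AND PROOFS =====

-- numrevWhile only increments its length accumulator.
theorem numrevWhile_ge (num_copy digit length L : Int)
    (h : numrevWhile num_copy digit length = some L) : length ≤ L := by
  fun_induction numrevWhile num_copy digit length with
  | case1 nc d len hnc hd => simp_all
  | case2 nc d len hnc hd ih => have := ih h; omega
  | case3 nc d len hnc => simp at h; omega

-- one unrolling of numrevFor
theorem numrevFor_succ (k : Nat) (nc num : Int) :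
    numrevFor (k + 1) nc num
      = numrevFor k (nc * 10 + PySem.Int.mod num 10) (PySem.Int.floordiv num 10) := rfl

-- Main invariant: B's fused pass equals A's while loop followed by the reversal pass,
-- with B's accumulators (rev, count) matching A's second pass restarted mid-way.
theorem go_eq (n digit rev count : Int) :
    numrevGo n digit rev count
      = match numrevWhile n digit count with
        | none => 0
        | some L => if L > 1 then (numrevFor (L - count).toNat rev n).1 else 0 := by
  fun_induction numrevGo n digit rev count with
  | case1 n d rev count hn hd =>
      rw [numrevWhile, dif_pos hn, dif_pos hd]
  | case2 n d rev count hn hd ih =>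
      rw [numrevWhile, dif_pos hn, dif_neg hd]
      rw [ih]
      cases hW : numrevWhile (PySem.Int.floordiv n 10) (PySem.Int.mod n 10) (count + 1) with
      | none => rfl
      | some L =>
          have hle := numrevWhile_ge _ _ _ _ hW
          simp only []
          congr 1
          have hk : (L - count).toNat = (L - (count + 1)).toNat + 1 := by omega
          rw [hk, numrevFor_succ]
  | case3 n d rev count hn hc =>
      rw [numrevWhile, dif_neg hn]
      simp [hc, numrevFor]
  | case4 n d rev count hn hc =>
      rw [numrevWhile, dif_neg hn]
      simp [hc]

-- ===== VERDICT (by name: the statement is the Claim_ definition above) =====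
theorem num_reverse_spec : Claim_equal_num_reverse := by
  intro num _
  unfold Spec_num_reverse num_reverse num_reverse_alt
  rw [go_eq]
  cases h : numrevWhile num 10 0 with
  | none => simp
  | some L => simp
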